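-- pv_equiv track=rewrite | github.com/alonana/top | python/fixed_point_reversal.py | section_sorter
-- ===== SOURCE A (Python) =====
-- def section_sorter(a):
--     sorted_a = a.copy()
--     sorted_a.sort()
--     left = 0
--     reversals = []
--     while not a == sorted_a:
--         while a[left] == sorted_a[left]:
--             left += 1
--         min_value = min(a[left:])
--         min_index = left + a[left:].index(min_value)
--         a[left:min_index + 1] = reversed(a[left:min_index + 1])
--         reversals.extend([left, min_index + 1])
--
--     return reversals
-- ===== SOURCE B (Python) =====
-- def section_sorter(a):
--     # Chunked rope with per-chunk lazy reversal flags: the remaining suffix is a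
--     # list of (segment, reversed?, segment_min) chunks; a prefix reversal just
--     # reverses the chunk list and flips flags, so elements are never moved wholesale.
--     reversals = []
--     rope = [(list(a), False, min(a))] if a else []
--     i = 0
--     while rope:
--         m = min(mn for _, _, mn in rope)
--         # leftmost chunk whose minimum is m; chunks before it contain no m
--         pos = 0
--         ci = 0
--         while rope[ci][2] != m:
--             pos += len(rope[ci][0])
--             ci += 1
--         seg, rev, _ = rope[ci]
--         eff = seg[::-1] if rev else seg
--         k = eff.index(m)
--         j = pos + k
--         if j == 0:
--             rest = eff[1:]
--             rope = ([(rest, False, min(rest))] if rest else []) + rope[1:]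
--         else:
--             reversals.append(i)
--             reversals.append(j + 1 + i)
--             left = eff[:k]
--             right = eff[k + 1:]
--             pre = rope[:ci] + ([(left, False, min(left))] if left else [])
--             flipped = [(s, not f, mn) for (s, f, mn) in reversed(pre)]
--             rope = flipped + ([(right, False, min(right))] if right else []) + rope[ci + 1:]
--         i += 1
--     return reversals
-- ===== Notes on version B (the rewrite author's own statement) =====
-- stated objective: alternative
-- what changed: Replaces A's in-place array simulation (sorted copy, whole-list equality test, physical slice reversal per round) by a chunked rope of (segment, reversed-flag, segment-min) pieces: a prefix reversal becomes reversing the chunk list and flipping flags, the minimum is found from per-chunk cached minima, and no full array is ever rewritten.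
import Mathlib
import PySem

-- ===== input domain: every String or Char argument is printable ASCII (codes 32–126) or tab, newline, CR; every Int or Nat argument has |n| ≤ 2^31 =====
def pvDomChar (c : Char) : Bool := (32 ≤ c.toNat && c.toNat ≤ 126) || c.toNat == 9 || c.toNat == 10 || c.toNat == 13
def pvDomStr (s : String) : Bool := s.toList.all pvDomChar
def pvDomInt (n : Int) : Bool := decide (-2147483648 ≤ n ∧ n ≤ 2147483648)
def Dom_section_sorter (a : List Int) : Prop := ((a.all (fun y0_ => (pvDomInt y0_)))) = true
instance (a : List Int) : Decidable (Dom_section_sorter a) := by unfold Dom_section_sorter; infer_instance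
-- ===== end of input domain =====

-- B replaces A's in-place array simulation by a chunked rope with lazy per-chunk reversal
-- flags and cached segment minima (alternative data structure, same asymptotic cost).
-- Python A mutates its argument list in place; Python B does not: the equivalence proved
-- here is about the RETURN value.


-- ===== PORT A =====
-- inner `while a[left] == sorted_a[left]: left += 1` (the `left < a.length` guard only
-- makes the recursion total; under A's loop guard `a ≠ sorted_a` it always holds before
-- the scan passes the first mismatch, exactly where Python's indexing is in range)
def pvSkipA (a s : List Int) (left : Nat) : Nat :=
  if left < a.length ∧ a.getD left 0 = s.getD left 0 then pvSkipA a s (left + 1) else left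
termination_by a.length - left
decreasing_by omega

-- outer `while not a == sorted_a`: fuel makes it total; `a.length + 1` fuel is proved
-- sufficient below.  The `none` fallbacks mirror Python's min()/index() raising, which
-- is unreachable under the loop guard (proved below).
def pvLoopA (s : List Int) : Nat → List Int → Nat → List Int → List Int
  | 0, _, _, rev => rev
  | fuel + 1, a, left, rev =>
    if a = s then rev
    else
      let l := pvSkipA a s left
      let tail := a.drop l                          -- a[left:]
      match PySem.List.min? tail (fun x => x) with  -- min(a[left:])
      | none => rev
      | some m =>
        match PySem.List.index? tail m with         -- a[left:].index(min_value)
        | none => rev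
        | some d =>
          -- a[left:min_index+1] = reversed(a[left:min_index+1])
          let a' := a.take l ++ (tail.take (d + 1)).reverse ++ a.drop (l + d + 1)
          pvLoopA s fuel a' l (rev ++ [(l : Int), ((l + d : Nat) + 1 : Int)])

def section_sorter (a : List Int) : List Int :=
  pvLoopA (PySem.List.sorted a (fun x => x) false) (a.length + 1) a 0 []

-- ===== PORT B =====
-- `[(l, False, min(l))] if l else []`: a chunk (segment, reversed?, cached min)
def pvChunk (l : List Int) : List (List Int × Bool × Int) :=
  match PySem.List.min? l (fun x => x) with
  | none => []
  | some mn => [(l, false, mn)]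

-- `while rope[ci][2] != m: pos += len(rope[ci][0]); ci += 1` — walks the chunk list,
-- returning (pos, rope[:ci], rope[ci:]) (the skipped prefix is accumulated instead of indexed)
def pvLocate (m : Int) : List (List Int × Bool × Int) → Nat → List (List Int × Bool × Int) →
    Nat × List (List Int × Bool × Int) × List (List Int × Bool × Int)
  | [], pos, pre => (pos, pre, [])
  | c :: rest, pos, pre =>
    if c.2.2 ≠ m then pvLocate m rest (pos + c.1.length) (pre ++ [c])
    else (pos, pre, c :: rest)

-- `while rope:` — each pass removes exactly one element, so `len(a) + 1` fuel suffices;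
-- the `acc` fallbacks mirror Python raising on empty min()/index(), unreachable here
def pvLoopB : Nat → List (List Int × Bool × Int) → Nat → List Int → List Int
  | 0, _, _, acc => acc
  | fuel + 1, rope, i, acc =>
    match rope with
    | [] => acc
    | _ :: _ =>
      match PySem.List.min? (rope.map (fun c => c.2.2)) (fun x => x) with
      | none => acc
      | some m =>
        match pvLocate m rope 0 [] with
        | (_, _, []) => acc
        | (pos, pre, c :: suf) =>
          let eff := if c.2.1 then c.1.reverse else c.1      -- seg[::-1] if rev else seg
          match PySem.List.index? eff m with
          | none => acc
          | some k =>
            let j := pos + k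
            if j = 0 then
              pvLoopB fuel (pvChunk (eff.drop 1) ++ rope.drop 1) (i + 1) acc
            else
              let left := eff.take k
              let right := eff.drop (k + 1)
              let preC := pre ++ pvChunk left
              let flipped := preC.reverse.map (fun s => (s.1, !s.2.1, s.2.2))
              pvLoopB fuel (flipped ++ pvChunk right ++ suf) (i + 1)
                (acc ++ [(i : Int), ((j + 1 + i : Nat) : Int)])

def section_sorter_alt (a : List Int) : List Int :=
  pvLoopB (a.length + 1) (pvChunk a) 0 []

-- ===== PRECONDITION & SPEC =====
def Spec_section_sorter (a : List Int) (out : List Int) : Prop := out = section_sorter_alt a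
instance (a : List Int) (out : List Int) : Decidable (Spec_section_sorter a out) := by unfold Spec_section_sorter; infer_instance

-- ===== CLAIM (what is proved, stated in full; the proofs are below) =====
def Claim_equal_section_sorter : Prop := ∀ (a : List Int), Dom_section_sorter a → Spec_section_sorter a (section_sorter a)

-- ===== LEMMAS AND PROOFS =====

-- the common list-level reference recursion both ports are reduced to:
-- state = the not-yet-fixed suffix `rem`; one step removes its leftmost minimum
def pvModelF : Nat → List Int → Nat → List Int → List Int
  | 0, _, _, acc => acc
  | fuel + 1, rem, i, acc =>
    match PySem.List.min? rem (fun x => x) with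
    | none => acc
    | some m =>
      match PySem.List.index? rem m with
      | none => acc
      | some j =>
        if j = 0 then pvModelF fuel (rem.drop 1) (i + 1) acc
        else pvModelF fuel ((rem.take j).reverse ++ rem.drop (j + 1)) (i + 1)
          (acc ++ [(i : Int), ((j + 1 + i : Nat) : Int)])

-- ---- A = model ----

-- getD bridges across drop / pairwise
lemma pvGetD_drop (a : List Int) (l t : Nat) (hl : l ≤ t) (ht : t < a.length) :
    (a.drop l).getD (t - l) 0 = a.getD t 0 := by
  rw [List.getD_eq_getElem _ 0 (by simp; omega), List.getD_eq_getElem a 0 ht,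
      List.getElem_drop]
  have h : l + (t - l) = t := by omega
  simp [h]

lemma pvMem_drop (a : List Int) (l t : Nat) (hl : l ≤ t) (ht : t < a.length) :
    a.getD t 0 ∈ a.drop l := by
  rw [← pvGetD_drop a l t hl ht, List.getD_eq_getElem _ 0 (by simp; omega)]
  exact List.getElem_mem _

lemma pvOf_mem_drop (a : List Int) (l : Nat) {y : Int} (h : y ∈ a.drop l) :
    ∃ t, l ≤ t ∧ t < a.length ∧ a.getD t 0 = y := by
  obtain ⟨u, hu, hyu⟩ := List.mem_iff_getElem.mp h
  have hu' : l + u < a.length := by simp at hu; omega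
  refine ⟨l + u, by omega, hu', ?_⟩
  have := pvGetD_drop a l (l + u) (by omega) hu'
  rw [show l + u - l = u by omega] at this
  rw [← this, List.getD_eq_getElem _ 0 (by simp; omega)]
  exact hyu

lemma pvPairwise_getD (s : List Int) (hp : s.Pairwise (· ≤ ·)) (p q : Nat)
    (hpq : p ≤ q) (hq : q < s.length) : s.getD p 0 ≤ s.getD q 0 := by
  rw [List.getD_eq_getElem s 0 (by omega), List.getD_eq_getElem s 0 hq]
  rcases Nat.eq_or_lt_of_le hpq with h | h
  · subst h; exact le_refl _
  · exact List.pairwise_iff_getElem.mp hp p q (by omega) hq h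

-- the outer loop does not care whether left is before or after an already-fixed position
lemma pvLoopA_shift (s : List Int) (fuel : Nat) (a : List Int) (l : Nat) (rev : List Int)
    (hl : l < a.length) (he : a.getD l 0 = s.getD l 0) :
    pvLoopA s fuel a l rev = pvLoopA s fuel a (l + 1) rev := by
  cases fuel with
  | zero => rfl
  | succ f =>
    have hskip : pvSkipA a s l = pvSkipA a s (l + 1) := by
      rw [pvSkipA, if_pos ⟨hl, he⟩]
    simp only [pvLoopA, hskip]

-- s[i] is ≤ everything in a[i:] (and occurs in it) when a matches s up to i
lemma pvSortedHeadMin (a : List Int) (i : Nat)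
    (hpre : a.take i = (PySem.List.sorted a (fun x => x) false).take i)
    (hi : i < a.length) :
    (∀ t, i ≤ t → t < a.length →
      (PySem.List.sorted a (fun x => x) false).getD i 0 ≤ a.getD t 0) ∧
    (PySem.List.sorted a (fun x => x) false).getD i 0 ∈ a.drop i := by
  set s := PySem.List.sorted a (fun x => x) false with hs
  have hlen : s.length = a.length := PySem.List.length_sorted a _ false
  have hperm : (a.drop i).Perm (s.drop i) := by
    have h1 : (a.take i ++ a.drop i).Perm (s.take i ++ s.drop i) := by
      rw [List.take_append_drop, List.take_append_drop]
      exact (PySem.List.sorted_perm a _ false).symm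
    rw [hpre] at h1
    exact (List.perm_append_left_iff _).mp h1
  have hpair : s.Pairwise (· ≤ ·) := PySem.List.sorted_pairwise a (fun x => x)
  have hsel : ∀ y ∈ a.drop i, s.getD i 0 ≤ y := by
    intro y hy
    obtain ⟨t, ht, htl, hty⟩ := pvOf_mem_drop s i (hperm.mem_iff.mp hy)
    rw [← hty]
    exact pvPairwise_getD s hpair i t ht htl
  refine ⟨fun t ht htl => hsel _ (pvMem_drop a i t ht htl), ?_⟩
  exact hperm.mem_iff.mpr (pvMem_drop s i i (le_refl i) (by omega))

-- m = s[l]: the first value still to be placed is the minimum of the unfixed suffix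
lemma pvMinVal (a : List Int) (l : Nat) (m : Int)
    (hpre : a.take l = (PySem.List.sorted a (fun x => x) false).take l)
    (hl : l < a.length)
    (hm : PySem.List.min? (a.drop l) (fun x => x) = some m) :
    m = (PySem.List.sorted a (fun x => x) false).getD l 0 := by
  obtain ⟨hle, hmem⟩ := pvSortedHeadMin a l hpre hl
  have h1 : m ≤ (PySem.List.sorted a (fun x => x) false).getD l 0 :=
    PySem.List.min?_isMin hm _ hmem
  have h2 : (PySem.List.sorted a (fun x => x) false).getD l 0 ≤ m := by
    obtain ⟨t, ht, htl, hty⟩ := pvOf_mem_drop a l (PySem.List.min?_mem hm)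
    exact hty ▸ hle t ht htl
  omega

-- on an already-sorted suffix the model strips one leftmost minimum per step and records nothing
lemma pvModelSorted : ∀ (fuel : Nat) (rem : List Int) (i : Nat) (acc : List Int),
    rem.Pairwise (· ≤ ·) → pvModelF fuel rem i acc = acc := by
  intro fuel
  induction fuel with
  | zero => intro rem i acc _; rfl
  | succ f ih =>
    intro rem i acc hp
    cases rem with
    | nil => rfl
    | cons x t =>
      obtain ⟨m, hm⟩ : ∃ m, PySem.List.min? (x :: t) (fun y => y) = some m := by
        cases h : PySem.List.min? (x :: t) (fun y => y) with
        | none => rw [PySem.List.min?_eq_none_iff] at h; simp at h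
        | some m => exact ⟨m, rfl⟩
      have hmx : m = x := by
        have h1 : m ≤ x := PySem.List.min?_isMin hm x List.mem_cons_self
        have h2 : x ≤ m := by
          rcases List.mem_cons.mp (PySem.List.min?_mem hm) with rfl | hmt
          · exact le_refl m
          · exact (List.pairwise_cons.mp hp).1 m hmt
        omega
      rw [pvModelF, hm]
      dsimp only
      rw [hmx, PySem.List.index?_cons_self]
      dsimp only
      rw [if_pos rfl]
      exact ih t (i + 1) acc (List.pairwise_cons.mp hp).2

lemma pvAM : ∀ (c : Nat), ∀ (fA fM : Nat) (a : List Int) (l : Nat) (rev : List Int),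
    a.length - l = c → c + 1 ≤ fA → c + 1 ≤ fM →
    a.take l = (PySem.List.sorted a (fun x => x) false).take l →
    pvLoopA (PySem.List.sorted a (fun x => x) false) fA a l rev
      = pvModelF fM (a.drop l) l rev := by
  intro c
  induction c using Nat.strong_induction_on with
  | _ c ih =>
  intro fA fM a l rev hc hfA hfM hpre
  obtain ⟨f, rfl⟩ : ∃ f, fA = f + 1 := ⟨fA - 1, by omega⟩
  obtain ⟨g, rfl⟩ : ∃ g, fM = g + 1 := ⟨fM - 1, by omega⟩
  set s := PySem.List.sorted a (fun x => x) false with hs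
  have hlen : s.length = a.length := PySem.List.length_sorted a _ false
  by_cases heq : a = s
  · rw [pvLoopA, if_pos heq]
    refine (pvModelSorted _ _ _ _ ?_).symm
    have : a.Pairwise (· ≤ ·) := by rw [heq]; exact PySem.List.sorted_pairwise a (fun x => x)
    exact this.drop
  · have hl : l < a.length := by
      by_contra h
      apply heq
      rw [← List.take_of_length_le (show a.length ≤ l by omega), hpre,
          List.take_of_length_le (by omega)]
    have hrne : a.drop l ≠ [] := by rw [ne_eq, List.drop_eq_nil_iff]; omega
    obtain ⟨m, hm⟩ : ∃ m, PySem.List.min? (a.drop l) (fun x => x) = some m := by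
      cases h : PySem.List.min? (a.drop l) (fun x => x) with
      | none => exact absurd ((PySem.List.min?_eq_none_iff _ _).mp h) hrne
      | some m => exact ⟨m, rfl⟩
    obtain ⟨d, hd⟩ : ∃ d, PySem.List.index? (a.drop l) m = some d := by
      cases h : PySem.List.index? (a.drop l) m with
      | none => exact absurd ((PySem.List.index?_eq_none_iff _ _).mp h) (by simp [PySem.List.min?_mem hm])
      | some d => exact ⟨d, rfl⟩
    have hmsl : m = s.getD l 0 := pvMinVal a l m hpre hl hm
    have hdlen : d < a.length - l := by
      obtain ⟨hk, _, _⟩ := PySem.List.getElem_of_index?_eq_some hd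
      simpa using hk
    have hd0 : a.getD l 0 = m ↔ d = 0 := by
      constructor
      · intro h
        cases hrem : a.drop l with
        | nil => exact absurd hrem hrne
        | cons r0 rt =>
          have hr0 : r0 = m := by
            have hg := pvGetD_drop a l l (le_refl l) hl
            rw [hrem, Nat.sub_self, List.getD_cons_zero] at hg
            omega
          rw [hrem, hr0, PySem.List.index?_cons_self] at hd
          simpa using hd.symm
      · intro h
        rw [h] at hd
        obtain ⟨hk, hke, _⟩ := PySem.List.getElem_of_index?_eq_some hd
        have := pvGetD_drop a l l (le_refl l) hl
        rw [Nat.sub_self, List.getD_eq_getElem _ 0 hk] at this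
        omega
    rw [pvModelF, hm]
    dsimp only
    rw [hd]
    dsimp only
    by_cases hal : a.getD l 0 = s.getD l 0
    · -- skip one position: A shifts left, the model strips the head
      have hdz : d = 0 := hd0.mp (by omega)
      rw [if_pos hdz]
      have hpre' : a.take (l + 1) = s.take (l + 1) := by
        rw [List.take_add_one, List.take_add_one, hpre]
        congr 1
        rw [List.getElem?_eq_getElem hl, List.getElem?_eq_getElem (show l < s.length by omega)]
        rw [List.getD_eq_getElem a 0 hl, List.getD_eq_getElem s 0 (show l < s.length by omega)] at hal
        rw [hal]
      have hshift := pvLoopA_shift s (f + 1) a l rev hl hal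
      rw [hshift]
      have hdd : (a.drop l).drop 1 = a.drop (l + 1) := by rw [List.drop_drop]
      rw [hdd]
      exact ih (c - 1) (by omega) (f + 1) g a (l + 1) rev (by omega) (by omega) (by omega) hpre'
    · -- real step: the same reversal on both sides
      have hdnz : d ≠ 0 := fun hh => hal (by rw [hd0.mpr hh]; exact hmsl)
      rw [if_neg hdnz]
      rw [pvLoopA, if_neg heq]
      have hskipl : pvSkipA a s l = l := by
        rw [pvSkipA, if_neg (by tauto)]
      simp only [hskipl]
      rw [hm]
      dsimp only
      rw [hd]
      dsimp only
      set a' := a.take l ++ ((a.drop l).take (d + 1)).reverse ++ a.drop (l + d + 1) with ha'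
      have hmid : ((a.drop l).take (d + 1)).length = d + 1 := by
        rw [List.length_take]; simp; omega
      have ha'len : a'.length = a.length := by
        rw [ha']; simp [List.length_take, List.length_drop]; omega
      have hperm : a'.Perm a := by
        conv_rhs => rw [← List.take_append_drop l a]
        rw [ha', List.append_assoc]
        apply List.Perm.append_left
        have hdd : a.drop (l + d + 1) = (a.drop l).drop (d + 1) := by
          rw [List.drop_drop]; congr 1
        rw [hdd]
        conv_rhs => rw [← List.take_append_drop (d + 1) (a.drop l)]
        exact List.Perm.append_right _ (List.reverse_perm _)
      have hsort' : PySem.List.sorted a' (fun x => x) false = s := by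
        rw [hs]
        exact PySem.List.sorted_eq_sorted_of_perm a' a (fun x => x) Function.injective_id hperm
      have htakel : a'.take l = a.take l := by
        rw [ha', List.append_assoc, List.take_left' (by rw [List.length_take]; omega)]
      have ha'l : a'.getD l 0 = m := by
        rw [ha', List.append_assoc, List.getD_append_right _ _ 0 l (by rw [List.length_take]; omega)]
        have hlt : l - (a.take l).length = 0 := by rw [List.length_take]; omega
        rw [hlt, List.getD_append _ _ 0 0 (by rw [List.length_reverse, hmid]; omega)]
        rw [List.getD_eq_getElem _ 0 (by rw [List.length_reverse, hmid]; omega), List.getElem_reverse]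
        have hidx : ((a.drop l).take (d + 1)).length - 1 - 0 = d := by rw [hmid]; omega
        simp only [hidx, List.getElem_take]
        obtain ⟨hk, hke, _⟩ := PySem.List.getElem_of_index?_eq_some hd
        exact hke
      have hpre'' : a'.take (l + 1) = s.take (l + 1) := by
        rw [List.take_add_one, List.take_add_one, htakel, hpre,
            List.getElem?_eq_getElem (show l < a'.length by omega),
            List.getElem?_eq_getElem (show l < s.length by omega)]
        have h1 : a'[l]'(by omega) = a'.getD l 0 := (List.getD_eq_getElem a' 0 (by omega)).symm
        have h2 : s[l]'(by omega) = s.getD l 0 := (List.getD_eq_getElem s 0 (by omega)).symm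
        rw [h1, h2, ha'l, ← hmsl]
      -- A: shift from l to l+1 on a'
      rw [pvLoopA_shift s f a' l _ (by omega) (by rw [ha'l]; exact hmsl)]
      -- the recorded pair is the same
      have hrec : rev ++ [(l : Int), ((l + d : Nat) + 1 : Int)]
          = rev ++ [(l : Int), ((d + 1 + l : Nat) : Int)] := by
        congr 2
        push_cast
        ring_nf
      rw [hrec]
      -- IH on a'
      have hih := ih (c - 1) (by omega) f g a' (l + 1)
          (rev ++ [(l : Int), ((d + 1 + l : Nat) : Int)])
          (by omega) (by omega) (by omega) (by rw [hsort']; exact hpre'')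
      rw [hsort'] at hih
      rw [hih]
      -- the two new suffixes coincide
      congr 1
      rw [ha']
      have h1 : (a.take l ++ ((a.drop l).take (d + 1)).reverse ++ a.drop (l + d + 1)).drop (l + 1)
          = (((a.drop l).take (d + 1)).reverse ++ a.drop (l + d + 1)).drop 1 := by
        rw [List.append_assoc, show l + 1 = (a.take l).length + 1 by rw [List.length_take]; omega,
            List.drop_length_add_append]
      rw [h1, List.drop_append_of_le_length (by rw [List.length_reverse, hmid]; omega)]
      have h2 : ((a.drop l).take (d + 1)).reverse.drop 1 = ((a.drop l).take d).reverse := by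
        have : (a.drop l).take (d + 1) = (a.drop l).take d ++ [(a.drop l)[d]'(by simp; omega)] := by
          rw [List.take_add_one, List.getElem?_eq_getElem (by simp; omega)]
          rfl
        rw [this, List.reverse_append]
        simp
      rw [h2]
      congr 1
      rw [List.drop_drop]
      congr 1

theorem pvA_eq_model (a : List Int) :
    section_sorter a = pvModelF (a.length + 1) a 0 [] := by
  unfold section_sorter
  have := pvAM a.length (a.length + 1) (a.length + 1) a 0 [] (by omega) (by omega) (by omega) (by simp)
  simpa using this

-- ---- B = model ----

-- effective sequence of a chunk / of the rope
def pvEff (c : List Int × Bool × Int) : List Int := if c.2.1 then c.1.reverse else c.1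
def pvFlat (rope : List (List Int × Bool × Int)) : List Int := (rope.map pvEff).flatten
-- chunk invariant: the cached field is min(segment)
def pvWF (rope : List (List Int × Bool × Int)) : Prop :=
  ∀ c ∈ rope, PySem.List.min? c.1 (fun x => x) = some c.2.2

lemma pvFlat_nil : pvFlat [] = [] := rfl
lemma pvFlat_cons (c : List Int × Bool × Int) (r : List (List Int × Bool × Int)) :
    pvFlat (c :: r) = pvEff c ++ pvFlat r := by simp [pvFlat]
lemma pvFlat_append (x y : List (List Int × Bool × Int)) :
    pvFlat (x ++ y) = pvFlat x ++ pvFlat y := by simp [pvFlat]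

lemma pvMem_eff (c : List Int × Bool × Int) (y : Int) : y ∈ pvEff c ↔ y ∈ c.1 := by
  unfold pvEff; split <;> simp

lemma pvEff_length (c : List Int × Bool × Int) : (pvEff c).length = c.1.length := by
  unfold pvEff; split <;> simp

lemma pvChunk_WF (l : List Int) : pvWF (pvChunk l) := by
  intro c hc
  unfold pvChunk at hc
  split at hc
  · simp at hc
  · next mn h => simp at hc; rw [hc]; exact h

lemma pvChunk_flat (l : List Int) : pvFlat (pvChunk l) = l := by
  unfold pvChunk
  split
  · next h => rw [PySem.List.min?_eq_none_iff] at h; simp [h, pvFlat]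
  · simp [pvFlat, pvEff]

lemma pvMem_flat (rope : List (List Int × Bool × Int)) (y : Int) :
    y ∈ pvFlat rope ↔ ∃ c ∈ rope, y ∈ c.1 := by
  induction rope with
  | nil => simp [pvFlat]
  | cons c r ih => rw [pvFlat_cons]; simp [pvMem_eff c y, ih]

lemma pvIndex?_append_of_not_mem (l1 l2 : List Int) (v : Int) (h : v ∉ l1) :
    PySem.List.index? (l1 ++ l2) v = (PySem.List.index? l2 v).map (· + l1.length) := by
  induction l1 with
  | nil => simp
  | cons x t ih =>
    have hx : x ≠ v := fun he => h (he ▸ List.mem_cons_self)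
    have ht : v ∉ t := fun he => h (List.mem_cons_of_mem _ he)
    rw [List.cons_append, PySem.List.index?_cons_of_ne _ hx, ih ht]
    cases PySem.List.index? l2 v
    · simp
    · simp
      omega

-- the minimum of the cached chunk minima is the minimum of the flattened rope
lemma pvMin_transfer (rope : List (List Int × Bool × Int)) (m : Int)
    (hwf : pvWF rope) (hm : PySem.List.min? (rope.map (fun c => c.2.2)) (fun x => x) = some m) :
    ∃ m', PySem.List.min? (pvFlat rope) (fun x => x) = some m' ∧ m' = m := by
  have hmem := PySem.List.min?_mem hm
  obtain ⟨c, hc, hcm⟩ := List.mem_map.mp hmem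
  have hmin := PySem.List.min?_isMin hm
  have hmflat : m ∈ pvFlat rope := by
    rw [pvMem_flat]
    exact ⟨c, hc, hcm ▸ PySem.List.min?_mem (hwf c hc)⟩
  have hne : pvFlat rope ≠ [] := fun h => by simp [h] at hmflat
  obtain ⟨m', hm'⟩ : ∃ m', PySem.List.min? (pvFlat rope) (fun x => x) = some m' := by
    cases h : PySem.List.min? (pvFlat rope) (fun x => x) with
    | none => exact absurd ((PySem.List.min?_eq_none_iff _ _).mp h) hne
    | some m' => exact ⟨m', rfl⟩
  refine ⟨m', hm', ?_⟩
  have h1 : m' ≤ m := PySem.List.min?_isMin hm' m hmflat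
  have h2 : m ≤ m' := by
    have hm'mem := PySem.List.min?_mem hm'
    obtain ⟨c', hc', hyc'⟩ := (pvMem_flat rope m').mp hm'mem
    have := PySem.List.min?_isMin (hwf c' hc') m' hyc'
    have := hmin c'.2.2 (List.mem_map.mpr ⟨c', hc', rfl⟩)
    omega
  omega

lemma pvLocate_spec (m : Int) :
    ∀ (rope : List (List Int × Bool × Int)) (pos : Nat) (pre : List (List Int × Bool × Int)),
    (∃ c ∈ rope, c.2.2 = m) →
    ∃ pre' c suf, pvLocate m rope pos pre =
        (pos + (pvFlat pre').length, pre ++ pre', c :: suf) ∧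
      rope = pre' ++ c :: suf ∧ (∀ p ∈ pre', p.2.2 ≠ m) ∧ c.2.2 = m := by
  intro rope
  induction rope with
  | nil => intro pos pre h; simp at h
  | cons c rest ih =>
    intro pos pre h
    by_cases hc : c.2.2 = m
    · refine ⟨[], c, rest, ?_, by simp, by simp, hc⟩
      unfold pvLocate
      rw [if_neg (by simpa using hc)]
      simp [pvFlat]
    · obtain ⟨c', hc', hcm⟩ := h
      rcases List.mem_cons.mp hc' with rfl | hc'rest
      · exact absurd hcm hc
      · obtain ⟨pre', cc, suf, heq, hsplit, hpre, hcm'⟩ :=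
          ih (pos + c.1.length) (pre ++ [c]) ⟨c', hc'rest, hcm⟩
        refine ⟨c :: pre', cc, suf, ?_, by simp [hsplit], ?_, hcm'⟩
        · unfold pvLocate
          rw [if_pos hc, heq]
          simp [pvFlat_cons, pvEff_length]
          omega
        · intro p hp
          rcases List.mem_cons.mp hp with rfl | hp'
          · exact hc
          · exact hpre p hp'

lemma pvFlat_flip (L : List (List Int × Bool × Int)) :
    pvFlat (L.reverse.map (fun s => (s.1, !s.2.1, s.2.2))) = (pvFlat L).reverse := by
  induction L with
  | nil => simp [pvFlat]
  | cons c t ih =>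
    rw [pvFlat_cons, List.reverse_cons, List.map_append, pvFlat_append, ih]
    have : pvEff (c.1, !c.2.1, c.2.2) = (pvEff c).reverse := by
      unfold pvEff
      rcases c with ⟨s, f, mn⟩
      cases f
      · simp
      · simp
    simp [pvFlat_cons, pvFlat_nil, this]

lemma pvB_main : ∀ (fuel : Nat) (rope : List (List Int × Bool × Int)) (i : Nat) (acc : List Int),
    pvWF rope → pvLoopB fuel rope i acc = pvModelF fuel (pvFlat rope) i acc := by
  intro fuel
  induction fuel with
  | zero => intro rope i acc _; rfl
  | succ f ih =>
    intro rope i acc hwf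
    match rope with
    | [] => rfl
    | c0 :: rest =>
      rw [pvLoopB]
      obtain ⟨m, hm⟩ : ∃ m, PySem.List.min? ((c0 :: rest).map (fun c => c.2.2)) (fun x => x) = some m := by
        cases h : PySem.List.min? ((c0 :: rest).map (fun c => c.2.2)) (fun x => x) with
        | none => rw [PySem.List.min?_eq_none_iff] at h; simp at h
        | some m => exact ⟨m, rfl⟩
      rw [hm]
      dsimp only
      obtain ⟨m', hm', rfl⟩ := pvMin_transfer _ m hwf hm
      rw [pvModelF, hm']
      dsimp only
      have hex : ∃ c ∈ (c0 :: rest), c.2.2 = m' := by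
        obtain ⟨c, hc, hcm⟩ := List.mem_map.mp (PySem.List.min?_mem hm)
        exact ⟨c, hc, hcm⟩
      obtain ⟨pre', c, suf, heq, hsplit, hprene, hcm⟩ := pvLocate_spec m' (c0 :: rest) 0 [] hex
      rw [heq]
      simp only [Nat.zero_add, List.nil_append]
      have hwfc := hwf c (hsplit ▸ (List.mem_append.mpr (Or.inr List.mem_cons_self)))
      have hmeff : m' ∈ (if c.2.1 then c.1.reverse else c.1) := by
        have : m' ∈ c.1 := hcm ▸ PySem.List.min?_mem hwfc
        split <;> simp [this]
      obtain ⟨k, hk⟩ : ∃ k, PySem.List.index? (if c.2.1 then c.1.reverse else c.1) m' = some k := by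
        cases h : PySem.List.index? (if c.2.1 then c.1.reverse else c.1) m' with
        | none => rw [PySem.List.index?_eq_none_iff] at h; exact absurd hmeff h
        | some k => exact ⟨k, rfl⟩
      rw [hk]
      dsimp only
      -- flatten decomposition
      have hflat : pvFlat (c0 :: rest) = pvFlat pre' ++ pvEff c ++ pvFlat suf := by
        rw [hsplit, pvFlat_append, pvFlat_cons, List.append_assoc]
      have heffc : pvEff c = (if c.2.1 then c.1.reverse else c.1) := by unfold pvEff; rfl
      have hnotpre : m' ∉ pvFlat pre' := by
        intro hmem
        obtain ⟨p, hp, hyp⟩ := (pvMem_flat pre' m').mp hmem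
        have hprope : p ∈ (c0 :: rest) := hsplit ▸ List.mem_append.mpr (Or.inl hp)
        have h1 := PySem.List.min?_isMin (hwf p hprope) m' hyp
        have h2 := PySem.List.min?_isMin hm p.2.2 (List.mem_map.mpr ⟨p, hprope, rfl⟩)
        exact hprene p hp (by omega)
      have hklen : k < (pvEff c).length := by
        obtain ⟨hlt, _, _⟩ := PySem.List.getElem_of_index?_eq_some (heffc ▸ hk)
        exact heffc ▸ hlt
      have hklen' : k < (if c.2.1 = true then c.1.reverse else c.1).length := by
        rw [← heffc]; exact hklen
      have hidx : PySem.List.index? (pvFlat (c0 :: rest)) m' = some ((pvFlat pre').length + k) := by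
        rw [hflat, List.append_assoc, pvIndex?_append_of_not_mem _ _ _ hnotpre,
            PySem.List.index?_append_of_mem _ (heffc ▸ hmeff), heffc, hk]
        simp [Nat.add_comm]
      rw [hidx]
      dsimp only
      by_cases hj : (pvFlat pre').length + k = 0
      · rw [if_pos hj, if_pos hj]
        have hpos0 : (pvFlat pre').length = 0 := by omega
        have hpre'nil : pvFlat pre' = [] := List.length_eq_zero_iff.mp hpos0
        have hflatdrop : (pvFlat (c0 :: rest)).drop 1 =
            (if c.2.1 then c.1.reverse else c.1).drop 1 ++ pvFlat suf := by
          rw [hflat, hpre'nil, List.nil_append, heffc,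
              List.drop_append_of_le_length (by omega)]
        have hpnil : pre' = [] := by
          cases pre' with
          | nil => rfl
          | cons p t =>
            exfalso
            have hp : p ∈ (c0 :: rest) := hsplit ▸ List.mem_append.mpr (Or.inl List.mem_cons_self)
            have hmemp : p.2.2 ∈ pvFlat (p :: t) :=
              (pvMem_flat _ _).mpr ⟨p, List.mem_cons_self, PySem.List.min?_mem (hwf p hp)⟩
            rw [hpre'nil] at hmemp
            simp at hmemp
        have hrope1 : (c0 :: rest).drop 1 = suf := by
          rw [hpnil] at hsplit
          simp at hsplit
          rw [hsplit.2]
          rfl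
        rw [ih _ _ _ ?_ , hrope1, pvFlat_append, pvChunk_flat, ← hflatdrop]
        · intro d hd
          rcases List.mem_append.mp hd with h | h
          · exact pvChunk_WF _ d h
          · refine hwf d ?_
            rw [hsplit, hpnil]
            simp
            rw [hrope1] at h
            exact Or.inr h
      · rw [if_neg hj, if_neg hj]
        have hpos : (pvFlat pre').length + k = (pvFlat pre').length + k := rfl
        -- take / drop decomposition of the flattened rope
        have htake : (pvFlat (c0 :: rest)).take ((pvFlat pre').length + k) =
            pvFlat pre' ++ (if c.2.1 then c.1.reverse else c.1).take k := by
          rw [hflat, List.append_assoc, List.take_length_add_append,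
              List.take_append_of_le_length (by omega), heffc]
        have hdrop : (pvFlat (c0 :: rest)).drop ((pvFlat pre').length + k + 1) =
            (if c.2.1 then c.1.reverse else c.1).drop (k + 1) ++ pvFlat suf := by
          rw [hflat, List.append_assoc, show (pvFlat pre').length + k + 1 = (pvFlat pre').length + (k + 1) by omega,
              List.drop_length_add_append,
              List.drop_append_of_le_length (by omega), heffc]
        rw [ih _ _ _ ?_]
        · congr 1
          rw [pvFlat_append, pvFlat_append, pvFlat_flip, pvFlat_append, pvChunk_flat,
              pvChunk_flat, htake, hdrop, List.append_assoc]
        · intro d hd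
          simp only [List.mem_append] at hd
          rcases hd with (h | h) | h
          · obtain ⟨s, hs, rfl⟩ := List.mem_map.mp h
            have hs' : s ∈ pre' ++ pvChunk ((if c.2.1 then c.1.reverse else c.1).take k) :=
              List.mem_reverse.mp hs
            rcases List.mem_append.mp hs' with h' | h'
            · have : s ∈ (c0 :: rest) := hsplit ▸ List.mem_append.mpr (Or.inl h')
              exact hwf s this
            · exact pvChunk_WF _ s h'
          · exact pvChunk_WF _ d h
          · exact hwf d (hsplit ▸ List.mem_append.mpr (Or.inr (List.mem_cons_of_mem _ h)))

theorem pvB_eq_model (a : List Int) :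
    pvLoopB (a.length + 1) (pvChunk a) 0 [] = pvModelF (a.length + 1) a 0 [] := by
  rw [pvB_main _ _ _ _ (pvChunk_WF a), pvChunk_flat]

-- ===== VERDICT (by name: the statement is the Claim_ definition above) =====
theorem section_sorter_spec : Claim_equal_section_sorter := by
  intro a _
  unfold Spec_section_sorter section_sorter_alt
  rw [pvB_eq_model, pvA_eq_model]
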